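-- pv_equiv track=rewrite | github.com/delfinaronco/algoritmos-1 | Guia7.py | cero_en_pos_pares_in
-- ===== SOURCE A (Python) =====
-- def cero_en_pos_pares_in (l: list[int]) -> list:
--     listaNueva: list = []
--     for i in range (len(l)):
--         if i % 2 == 0:
--             listaNueva.append(0)
--         else:
--             listaNueva.append(i)
--     return listaNueva
-- ===== SOURCE B (Python) =====
-- def cero_en_pos_pares_in(l: list[int]) -> list:
--     res = list(range(len(l)))
--     res[::2] = [0] * ((len(l) + 1) // 2)
--     return res
-- ===== Notes on version B (the rewrite author's own statement) =====
-- stated objective: idiomatic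
-- what changed: Instead of a per-index loop with an if/else appending zero or i, B builds list(range(n)) in one step and overwrites all even positions at once with a strided slice assignment of (n+1)//2 zeros.
import Mathlib
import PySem

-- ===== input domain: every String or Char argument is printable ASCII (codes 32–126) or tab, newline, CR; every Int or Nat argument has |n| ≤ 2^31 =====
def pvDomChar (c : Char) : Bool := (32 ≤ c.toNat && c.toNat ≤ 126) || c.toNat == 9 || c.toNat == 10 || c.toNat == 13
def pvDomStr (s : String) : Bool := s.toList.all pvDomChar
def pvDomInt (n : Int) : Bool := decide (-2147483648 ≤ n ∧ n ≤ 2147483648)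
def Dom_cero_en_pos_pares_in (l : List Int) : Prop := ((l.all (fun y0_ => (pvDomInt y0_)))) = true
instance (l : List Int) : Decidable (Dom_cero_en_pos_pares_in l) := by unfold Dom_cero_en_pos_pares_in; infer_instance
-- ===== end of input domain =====

-- B replaces A's per-index loop with an if/else by list(range(n)) followed by one strided
-- slice assignment of (n+1)//2 zeros into res[::2]; objective: idiomatic, same O(n) cost.

-- ===== PORT A =====
-- for i in range(len(l)): append 0 if i even else i
def cero_en_pos_pares_in (l : List Int) : List Int :=
  (PySem.List.pyRange 0 (l.length : Int) 1).foldl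
    (fun listaNueva i =>
      if PySem.Int.mod i 2 = 0 then listaNueva ++ [0] else listaNueva ++ [i]) []

-- ===== PORT B =====
-- the slice assignment of k zeros into res[::2] overwrites positions 0,2,4,…: hand-ported as a two-at-a-time walk that
-- replaces every element at an even offset by 0 (exact: the zero count (n+1)//2 equals the
-- number of even positions, so the Python slice assignment never raises).
def pvSetEvens : List Int → List Int
  | [] => []
  | [_] => [0]
  | _ :: y :: rest => 0 :: y :: pvSetEvens rest

def cero_en_pos_pares_in_alt (l : List Int) : List Int :=
  pvSetEvens (PySem.List.pyRange 0 (l.length : Int) 1)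

-- ===== PRECONDITION & SPEC =====
def Spec_cero_en_pos_pares_in (l : List Int) (out : List Int) : Prop := out = cero_en_pos_pares_in_alt l
instance (l : List Int) (out : List Int) : Decidable (Spec_cero_en_pos_pares_in l out) := by unfold Spec_cero_en_pos_pares_in; infer_instance

-- ===== CLAIM (what is proved, stated in full; the proofs are below) =====
def Claim_equal_cero_en_pos_pares_in : Prop := ∀ (l : List Int), Dom_cero_en_pos_pares_in l → Spec_cero_en_pos_pares_in l (cero_en_pos_pares_in l)

-- ===== LEMMAS AND PROOFS =====

-- A's loop appends one element per index: it is the map of the branch over the range.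
theorem pvFoldl_append_map (xs : List Int) (acc : List Int) :
    xs.foldl (fun a i => if PySem.Int.mod i 2 = 0 then a ++ [0] else a ++ [i]) acc
      = acc ++ xs.map (fun i => if PySem.Int.mod i 2 = 0 then (0 : Int) else i) := by
  induction xs generalizing acc with
  | nil => simp
  | cons x xs ih =>
    simp only [List.foldl_cons, List.map_cons, ih]
    split <;> simp

-- B's even-position overwrite on a consecutive range starting at an even s.
theorem pvSetEvens_pyRange (n : Nat) : ∀ (s : Int), 0 ≤ s → PySem.Int.mod s 2 = 0 →
    pvSetEvens (PySem.List.pyRange s (s + n) 1)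
      = (PySem.List.pyRange s (s + n) 1).map
          (fun i => if PySem.Int.mod i 2 = 0 then (0 : Int) else i) := by
  induction n using Nat.twoStepInduction with
  | zero =>
    intro s _ _
    rw [PySem.List.pyRange_one_eq_nil (by omega)]
    simp [pvSetEvens]
  | one =>
    intro s _ hs
    push_cast
    rw [PySem.List.pyRange_one_singleton s]
    have hs' : s % 2 = 0 := by rwa [PySem.Int.mod_eq_emod_of_pos (by omega)] at hs
    simp [pvSetEvens]
    omega
  | more n ih _ =>
    intro s hs0 hs
    have hn : ((n + 2 : Nat) : Int) = (n : Int) + 2 := by push_cast; ring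
    rw [hn]
    have h1 : PySem.List.pyRange s (s + ((n : Int) + 2)) 1
        = s :: PySem.List.pyRange (s + 1) (s + ((n : Int) + 2)) 1 :=
      PySem.List.pyRange_one_cons (by omega)
    have h2 : PySem.List.pyRange (s + 1) (s + ((n : Int) + 2)) 1
        = (s + 1) :: PySem.List.pyRange (s + 1 + 1) (s + ((n : Int) + 2)) 1 :=
      PySem.List.pyRange_one_cons (by omega)
    have hmod : PySem.Int.mod s 2 = s % 2 := PySem.Int.mod_eq_emod_of_pos (by omega)
    have hmod1 : PySem.Int.mod (s + 1) 2 = (s + 1) % 2 := PySem.Int.mod_eq_emod_of_pos (by omega)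
    have hmod2 : PySem.Int.mod (s + 2) 2 = (s + 2) % 2 := PySem.Int.mod_eq_emod_of_pos (by omega)
    have hs' : (s : Int) % 2 = 0 := by rw [hmod] at hs; exact hs
    have heq : s + ((n : Int) + 2) = (s + 2) + (n : Nat) := by push_cast; ring
    rw [h1, h2]
    simp only [pvSetEvens, List.map_cons]
    rw [hmod, if_pos hs', hmod1, if_neg (by omega),
        show s + 1 + 1 = s + 2 by ring, heq, ih (s + 2) (by omega) (by rw [hmod2]; omega)]

-- ===== VERDICT (by name: the statement is the Claim_ definition above) =====
theorem cero_en_pos_pares_in_spec : Claim_equal_cero_en_pos_pares_in := by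
  intro l _
  unfold Spec_cero_en_pos_pares_in cero_en_pos_pares_in cero_en_pos_pares_in_alt
  rw [pvFoldl_append_map, List.nil_append]
  have := pvSetEvens_pyRange l.length 0 le_rfl (by decide)
  simpa using this.symm
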